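-- pv_equiv track=rewrite | github.com/FilipBienkowski3/PythonBasics | Zestaw6/32.py | rek
-- ===== SOURCE A (Python) =====
-- def rek(T, k, index=0, P1=0, P2=0, s1=0, s2=0):
--   if index == len(T):
--     if P1 + P2 == k and s1 > 0 and s2 > 0:
--       return True
--     return False
--   else:
--     if rek(T, k, index + 1, P1, P2, s1, s2):
--       return True
--     if rek(T, k, index + 1, P1 + T[index], P2, s1 + 1, s2):
--       return True
--     if rek(T, k, index + 1, P1, P2 + T[index], s1, s2 + 1):
--       return True
--   return False
-- ===== SOURCE B (Python) =====
-- def rek(T, k, index=0, P1=0, P2=0, s1=0, s2=0):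
--     # Subset-sum DP over reachable (sum, capped-size) pairs.
--     # A's 3-way recursion succeeds iff some sub-multiset S of the scanned
--     # elements has P1+P2+sum(S) == k and can be split into two piles making
--     # both pile counters positive, i.e. len(S) >= max(0,1-s1)+max(0,1-s2).
--     r = max(0, 1 - s1) + max(0, 1 - s2)
--     target = k - P1 - P2
--     states = {(0, 0)}
--     for i in range(index, len(T)):
--         x = T[i]
--         states |= {(s + x, min(c + 1, r)) for (s, c) in states}
--     return (target, r) in states
-- ===== Notes on version B (the rewrite author's own statement) =====
-- stated objective: faster
-- what changed: Replaced the exponential 3-way skip/pile1/pile2 recursion by an iterative subset-sum DP over a set of reachable (sum, capped element-count) pairs, using that only the combined sum and whether each pile can be made non-empty matter.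
-- outside the precondition, e.g. on rek([1], 0, -2, 0, 0, 1, 1): A returns True, B raises IndexError
import Mathlib
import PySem

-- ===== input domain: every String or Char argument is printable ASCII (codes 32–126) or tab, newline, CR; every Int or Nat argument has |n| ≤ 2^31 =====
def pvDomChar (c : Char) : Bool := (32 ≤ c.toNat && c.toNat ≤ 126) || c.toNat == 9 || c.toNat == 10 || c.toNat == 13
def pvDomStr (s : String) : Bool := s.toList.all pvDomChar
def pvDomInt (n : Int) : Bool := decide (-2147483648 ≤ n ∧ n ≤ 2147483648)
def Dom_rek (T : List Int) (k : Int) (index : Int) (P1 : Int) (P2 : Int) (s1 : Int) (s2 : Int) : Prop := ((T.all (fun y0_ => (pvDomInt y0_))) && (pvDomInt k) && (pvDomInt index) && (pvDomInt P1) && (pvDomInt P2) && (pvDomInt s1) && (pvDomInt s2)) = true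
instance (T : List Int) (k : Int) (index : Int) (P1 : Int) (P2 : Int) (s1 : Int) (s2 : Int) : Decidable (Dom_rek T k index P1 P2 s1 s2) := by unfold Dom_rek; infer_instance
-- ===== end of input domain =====

-- B replaces A's exponential 3-way recursion by an iterative subset-sum DP over
-- reachable (sum, capped count) pairs (objective: faster, asymptotically).

-- ===== PORT A =====
-- A's recursion advances 'index' to len(T); fuel = (len(T) - index).toNat counts the
-- remaining levels; for index > len(T) the Python recurses forever (excluded by Pre_).
def rekAux (T : List Int) (k : Int) : Nat → Int → Int → Int → Int → Int → Bool
  | 0, _index, P1, P2, s1, s2 => decide (P1 + P2 = k ∧ s1 > 0 ∧ s2 > 0)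
  | fuel+1, index, P1, P2, s1, s2 =>
    if rekAux T k fuel (index+1) P1 P2 s1 s2 then true
    else
      match PySem.List.pyGet? T index with
      | none => false   -- Python raises IndexError here; excluded by Pre_
      | some x =>
        if rekAux T k fuel (index+1) (P1+x) P2 (s1+1) s2 then true
        else if rekAux T k fuel (index+1) P1 (P2+x) s1 (s2+1) then true
        else false

def rek (T : List Int) (k : Int) (index : Int) (P1 : Int) (P2 : Int) (s1 : Int) (s2 : Int) : Bool :=
  rekAux T k ((T.length - index).toNat) index P1 P2 s1 s2

-- ===== PORT B =====
def rek_alt (T : List Int) (k : Int) (index : Int) (P1 : Int) (P2 : Int) (s1 : Int) (s2 : Int) : Bool :=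
  let r : Int := max 0 (1 - s1) + max 0 (1 - s2)
  let target : Int := k - P1 - P2
  let states : PySem.Set (Int × Int) :=
    (PySem.List.pyRange index (T.length : Int) 1).foldl
      (fun st i =>
        let x := PySem.List.pyGetD T i 0   -- T[i]; exact under Pre_ (i in range)
        PySem.Set.union st (st.map (fun p => (p.1 + x, min (p.2 + 1) r))))
      (PySem.Set.ofList [((0 : Int), (0 : Int))])
  decide ((target, r) ∈ states)

-- ===== PRECONDITION & SPEC =====
-- Pre_ excludes index > len(T), where A recurses forever (RecursionError), and
-- index < -len(T), where both A (except when the initial state already satisfies the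
-- final test, so the all-skip branch returns True first) and B raise IndexError on T[index].
def Pre_rek (T : List Int) (_k : Int) (index : Int) (_P1 : Int) (_P2 : Int) (_s1 : Int) (_s2 : Int) : Prop :=
  -(T.length : Int) ≤ index ∧ index ≤ (T.length : Int)
instance (T : List Int) (k : Int) (index : Int) (P1 : Int) (P2 : Int) (s1 : Int) (s2 : Int) : Decidable (Pre_rek T k index P1 P2 s1 s2) := by unfold Pre_rek; infer_instance

def pvWitness_rek : List Int × Int × Int × Int × Int × Int × Int := ([1, 2, 3], 5, 0, 0, 0, 0, 0)

def Spec_rek (T : List Int) (k : Int) (index : Int) (P1 : Int) (P2 : Int) (s1 : Int) (s2 : Int) (out : Bool) : Prop := out = rek_alt T k index P1 P2 s1 s2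
instance (T : List Int) (k : Int) (index : Int) (P1 : Int) (P2 : Int) (s1 : Int) (s2 : Int) (out : Bool) : Decidable (Spec_rek T k index P1 P2 s1 s2 out) := by unfold Spec_rek; infer_instance

-- ===== CLAIM (what is proved, stated in full; the proofs are below) =====
def Claim_equal_rek : Prop := ∀ (T : List Int) (k : Int) (index : Int) (P1 : Int) (P2 : Int) (s1 : Int) (s2 : Int), Dom_rek T k index P1 P2 s1 s2 → Pre_rek T k index P1 P2 s1 s2 → Spec_rek T k index P1 P2 s1 s2 (rek T k index P1 P2 s1 s2)

-- ===== LEMMAS AND PROOFS =====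

-- recursive characterisation of A: decision over the list of scanned elements
def good (k : Int) : List Int → Int → Int → Int → Int → Bool
  | [], P1, P2, s1, s2 => decide (P1 + P2 = k ∧ s1 > 0 ∧ s2 > 0)
  | x :: rest, P1, P2, s1, s2 =>
      good k rest P1 P2 s1 s2 || good k rest (P1+x) P2 (s1+1) s2 || good k rest P1 (P2+x) s1 (s2+1)

-- the elements A scans, starting at 'index', 'fuel' of them
def elems (T : List Int) : Int → Nat → List Int
  | _, 0 => []
  | index, fuel+1 => PySem.List.pyGetD T index 0 :: elems T (index+1) fuel

lemma rekAux_eq_good (T : List Int) (k : Int) :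
    ∀ (fuel : Nat) (index P1 P2 s1 s2 : Int),
      -(T.length : Int) ≤ index → index + fuel ≤ (T.length : Int) →
      rekAux T k fuel index P1 P2 s1 s2 = good k (elems T index fuel) P1 P2 s1 s2 := by
  intro fuel
  induction fuel with
  | zero => intro index P1 P2 s1 s2 _ _; simp [rekAux, elems, good]
  | succ f ih =>
    intro index P1 P2 s1 s2 h1 h2
    have hx : PySem.List.pyGet? T index = some (PySem.List.pyGetD T index 0) := by
      have hin : PySem.Raise.InRange T.length index := by
        constructor <;> omega
      simp [PySem.List.pyGetD]
      cases hg : PySem.List.pyGet? T index with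
      | none => exact absurd ((PySem.List.pyGet?_eq_none_iff T index).mp hg) (by simp [hin])
      | some v => rfl
    have e1 := ih (index+1) P1 P2 s1 s2 (by omega) (by omega)
    have e2 := ih (index+1) (P1 + PySem.List.pyGetD T index 0) P2 (s1+1) s2 (by omega) (by omega)
    have e3 := ih (index+1) P1 (P2 + PySem.List.pyGetD T index 0) s1 (s2+1) (by omega) (by omega)
    simp only [rekAux, hx, e1, e2, e3, elems, good]
    cases good k (elems T (index+1) f) P1 P2 s1 s2 <;>
      cases good k (elems T (index+1) f) (P1 + PySem.List.pyGetD T index 0) P2 (s1+1) s2 <;>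
        cases good k (elems T (index+1) f) P1 (P2 + PySem.List.pyGetD T index 0) s1 (s2+1) <;> simp

lemma elems_eq_map (T : List Int) :
    ∀ (fuel : Nat) (index : Int), index + fuel = (T.length : Int) →
      elems T index fuel = (PySem.List.pyRange index (T.length : Int) 1).map
        (fun i => PySem.List.pyGetD T i 0) := by
  intro fuel
  induction fuel with
  | zero =>
    intro index h
    rw [PySem.List.pyRange_one_eq_nil (by omega)]
    simp [elems]
  | succ f ih =>
    intro index h
    rw [PySem.List.pyRange_one_cons (by omega)]
    simp only [List.map_cons, elems]
    rw [ih (index+1) (by omega)]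

-- membership in B's DP set after folding xs
lemma mem_foldl_step (r : Int) :
    ∀ (xs : List Int) (st : PySem.Set (Int × Int)) (_hst : ∀ q ∈ st, q.2 ≤ r) (p : Int × Int),
      p ∈ xs.foldl
        (fun st x => PySem.Set.union st (st.map (fun p => (p.1 + x, min (p.2 + 1) r)))) st ↔
      ∃ q ∈ st, ∃ S : List Int, S.Sublist xs ∧ p = (q.1 + S.sum, min (q.2 + S.length) r) := by
  intro xs
  induction xs with
  | nil =>
    intro st hst p
    simp only [List.foldl_nil]
    constructor
    · intro hp
      refine ⟨p, hp, [], List.Sublist.refl _, ?_⟩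
      have h := hst p hp
      cases p with
      | mk a b => simp; omega
    · rintro ⟨q, hq, S, hS, rfl⟩
      have hS0 : S = [] := List.sublist_nil.mp hS
      subst hS0
      have h := hst q hq
      have : (q.1 + ([] : List Int).sum, min (q.2 + (([] : List Int).length : Int)) r) = q := by
        cases q with
        | mk a b => simp; omega
      rw [this]; exact hq
  | cons x rest ih =>
    intro st hst p
    simp only [List.foldl_cons]
    have hst' : ∀ q ∈ PySem.Set.union st (st.map (fun p => (p.1 + x, min (p.2 + 1) r))), q.2 ≤ r := by
      intro q hq
      rcases (PySem.Set.mem_union _ _ _).mp hq with h | h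
      · exact hst q h
      · rcases List.mem_map.mp h with ⟨q0, _, rfl⟩
        exact min_le_right _ _
    rw [ih _ hst' p]
    constructor
    · rintro ⟨q', hq', S, hS, rfl⟩
      rcases (PySem.Set.mem_union _ _ _).mp hq' with h | h
      · exact ⟨q', h, S, hS.cons x, rfl⟩
      · rcases List.mem_map.mp h with ⟨q, hq, rfl⟩
        refine ⟨q, hq, x :: S, hS.cons₂ x, ?_⟩
        have hL : (0:Int) ≤ (S.length : Int) := by positivity
        simp only [Prod.mk.injEq, List.sum_cons, List.length_cons]
        constructor
        · ring
        · push_cast; omega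
    · rintro ⟨q, hq, S, hS, rfl⟩
      rcases List.sublist_cons_iff.mp hS with h | ⟨S', rfl, hS'⟩
      · exact ⟨q, (PySem.Set.mem_union _ _ _).mpr (Or.inl hq), S, h, rfl⟩
      · refine ⟨(q.1 + x, min (q.2 + 1) r),
          (PySem.Set.mem_union _ _ _).mpr (Or.inr (List.mem_map.mpr ⟨q, hq, rfl⟩)),
          S', hS', ?_⟩
        have hL : (0:Int) ≤ (S'.length : Int) := by positivity
        simp only [Prod.mk.injEq, List.sum_cons, List.length_cons]
        constructor
        · ring
        · push_cast; omega

lemma good_iff (k : Int) :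
    ∀ (xs : List Int) (P1 P2 s1 s2 : Int),
      good k xs P1 P2 s1 s2 = true ↔
      ∃ S : List Int, S.Sublist xs ∧ ∃ c1 c2 : Int, 0 ≤ c1 ∧ 0 ≤ c2 ∧
        c1 + c2 = S.length ∧ P1 + P2 + S.sum = k ∧ s1 + c1 > 0 ∧ s2 + c2 > 0 := by
  intro xs
  induction xs with
  | nil =>
    intro P1 P2 s1 s2
    simp only [good, decide_eq_true_eq]
    constructor
    · rintro ⟨h1, h2, h3⟩
      exact ⟨[], List.Sublist.refl _, 0, 0, le_refl _, le_refl _, by simp, by simpa using h1,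
        by omega, by omega⟩
    · rintro ⟨S, hS, c1, c2, h1, h2, h3, h4, h5, h6⟩
      have hS0 : S = [] := List.sublist_nil.mp hS
      subst hS0
      simp only [List.length_nil, List.sum_nil, Nat.cast_zero] at h3 h4
      exact ⟨by omega, by omega, by omega⟩
  | cons x rest ih =>
    intro P1 P2 s1 s2
    simp only [good, Bool.or_eq_true, ih]
    constructor
    · rintro ((⟨S, hS, c1, c2, h1, h2, h3, h4, h5, h6⟩ | ⟨S, hS, c1, c2, h1, h2, h3, h4, h5, h6⟩) |
        ⟨S, hS, c1, c2, h1, h2, h3, h4, h5, h6⟩)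
      · exact ⟨S, hS.cons x, c1, c2, h1, h2, h3, h4, h5, h6⟩
      · refine ⟨x :: S, hS.cons₂ x, c1 + 1, c2, by omega, by omega, ?_, ?_, by omega, by omega⟩
        · simp only [List.length_cons]; push_cast; omega
        · simp only [List.sum_cons]; omega
      · refine ⟨x :: S, hS.cons₂ x, c1, c2 + 1, by omega, by omega, ?_, ?_, by omega, by omega⟩
        · simp only [List.length_cons]; push_cast; omega
        · simp only [List.sum_cons]; omega
    · rintro ⟨S, hS, c1, c2, h1, h2, h3, h4, h5, h6⟩
      rcases List.sublist_cons_iff.mp hS with h | ⟨S', rfl, hS'⟩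
      · exact Or.inl (Or.inl ⟨S, h, c1, c2, h1, h2, h3, h4, h5, h6⟩)
      · simp only [List.sum_cons, List.length_cons] at h3 h4
        push_cast at h3
        by_cases hc : 1 ≤ c1
        · exact Or.inl (Or.inr ⟨S', hS', c1 - 1, c2, by omega, by omega, by omega, by omega,
            by omega, by omega⟩)
        · exact Or.inr ⟨S', hS', c1, c2 - 1, by omega, by omega, by omega, by omega,
            by omega, by omega⟩

-- ===== VERDICT (by name: the statement is the Claim_ definition above) =====
theorem rek_spec : Claim_equal_rek := by
  intro T k index P1 P2 s1 s2 _hdom hpre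
  obtain ⟨h1, h2⟩ := hpre
  unfold Spec_rek rek rek_alt
  dsimp only
  rw [rekAux_eq_good T k _ index P1 P2 s1 s2 h1 (by omega)]
  rw [elems_eq_map T _ index (by omega)]
  set r : Int := max 0 (1 - s1) + max 0 (1 - s2) with hr
  have hr0 : 0 ≤ r := by positivity
  set f : Int → Int := fun i => PySem.List.pyGetD T i 0 with hf
  set xs : List Int := (PySem.List.pyRange index (T.length : Int) 1).map f with hxs
  rw [Bool.eq_iff_iff, good_iff]
  have hfold : (PySem.List.pyRange index (T.length : Int) 1).foldl
      (fun st i => PySem.Set.union st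
        (st.map (fun p => (p.1 + PySem.List.pyGetD T i 0, min (p.2 + 1) r))))
      (PySem.Set.ofList [((0 : Int), (0 : Int))]) =
    xs.foldl (fun st x => PySem.Set.union st (st.map (fun p => (p.1 + x, min (p.2 + 1) r))))
      (PySem.Set.ofList [((0 : Int), (0 : Int))]) :=
    (List.foldl_map (f := f)
      (g := fun st x => PySem.Set.union st (st.map (fun p => (p.1 + x, min (p.2 + 1) r))))
      (l := PySem.List.pyRange index (T.length : Int) 1)
      (init := PySem.Set.ofList [((0 : Int), (0 : Int))])).symm
  rw [hfold, decide_eq_true_eq]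
  have hinit : PySem.Set.ofList [((0 : Int), (0 : Int))] = [((0 : Int), (0 : Int))] := by decide
  rw [hinit]
  rw [mem_foldl_step r xs [((0 : Int), (0 : Int))] (by intro q hq; simp at hq; simp [hq, hr0])]
  constructor
  · rintro ⟨S, hS, c1, c2, hc1, hc2, hlen, hsum, hp1, hp2⟩
    refine ⟨((0 : Int), (0 : Int)), by simp, S, hS, ?_⟩
    have hrle : r ≤ (S.length : Int) := by
      have e1 : max 0 (1 - s1) ≤ c1 := by omega
      have e2 : max 0 (1 - s2) ≤ c2 := by omega
      omega
    simp only [Prod.mk.injEq]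
    constructor
    · omega
    · omega
  · rintro ⟨q, hq, S, hS, heq⟩
    simp only [List.mem_singleton] at hq
    subst hq
    simp only [Prod.mk.injEq] at heq
    obtain ⟨e1, e2⟩ := heq
    have hL : (0 : Int) ≤ (S.length : Int) := by positivity
    have hrle : r ≤ (S.length : Int) := by omega
    refine ⟨S, hS, max 0 (1 - s1), (S.length : Int) - max 0 (1 - s1), by omega, by omega,
      by omega, by omega, by omega, by omega⟩
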